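-- pv_equiv track=rewrite | github.com/sharmarnavv/git-gud | resume_parser/resume_skills_extractor.py | _determine_proficiency_level
-- ===== SOURCE A (Python) =====
-- from typing import Dict, List, Any, Tuple, Optional, Set
--
-- def _determine_proficiency_level(mentions: List[Dict[str, Any]]) -> Optional[str]:
--     """Determine overall proficiency level from all mentions."""
--     if not mentions:
--         return None
--
--     # Collect all proficiency indicators
--     all_indicators = []
--     for mention in mentions:
--         all_indicators.extend(mention.get('proficiency_indicators', []))
--
--     if not all_indicators:
--         return None
--
--     # Determine highest proficiency level mentioned
--     proficiency_hierarchy = ['expert', 'advanced', 'intermediate', 'beginner']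
--
--     for level in proficiency_hierarchy:
--         if level in all_indicators:
--             return level
--
--     return None
-- ===== SOURCE B (Python) =====
-- from typing import Dict, List, Any, Optional
--
-- def _determine_proficiency_level(mentions: List[Dict[str, Any]]) -> Optional[str]:
--     """Determine overall proficiency level: one pass tracking the minimum rank of any recognized indicator."""
--     if not mentions:
--         return None
--     levels = ['expert', 'advanced', 'intermediate', 'beginner']
--     rank = {lvl: i for i, lvl in enumerate(levels)}
--     best = None
--     for mention in mentions:
--         for ind in mention.get('proficiency_indicators', []):
--             r = rank.get(ind)
--             if r is not None and (best is None or r < best):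
--                 best = r
--     return None if best is None else levels[best]
-- ===== Notes on version B (the rewrite author's own statement) =====
-- stated objective: alternative
-- what changed: Replaces building a flat indicator list and then scanning the hierarchy with 'in' membership tests by one pass over the indicators tracking the minimum rank via a rank dict, mapped back to its level name at the end.
import Mathlib
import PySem

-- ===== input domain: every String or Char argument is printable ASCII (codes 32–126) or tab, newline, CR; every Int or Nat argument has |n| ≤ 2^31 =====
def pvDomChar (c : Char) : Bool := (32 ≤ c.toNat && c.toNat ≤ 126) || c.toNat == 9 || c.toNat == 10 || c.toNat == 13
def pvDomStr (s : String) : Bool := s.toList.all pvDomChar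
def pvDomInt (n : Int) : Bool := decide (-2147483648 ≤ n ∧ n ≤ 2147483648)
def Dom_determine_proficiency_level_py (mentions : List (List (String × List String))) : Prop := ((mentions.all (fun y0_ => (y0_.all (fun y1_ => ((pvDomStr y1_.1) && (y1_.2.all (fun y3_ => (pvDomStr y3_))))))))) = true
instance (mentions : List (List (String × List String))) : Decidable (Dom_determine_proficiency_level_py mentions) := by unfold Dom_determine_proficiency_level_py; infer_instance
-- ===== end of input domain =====

-- B changes A's flat-list-then-hierarchy-scan into one pass over the indicators tracking the
-- minimum proficiency rank via a rank dict (objective: alternative single-pass decomposition).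

-- ===== PORT A =====
-- mention.get('proficiency_indicators', [])
def pvGetInd (m : List (String × List String)) : List String :=
  PySem.Dict.getD (PySem.Dict.mk m) "proficiency_indicators" []

def determine_proficiency_level_py (mentions : List (List (String × List String))) : Option String :=
  if mentions = [] then none
  else
    -- all_indicators built by extend over the mentions
    let all_indicators := mentions.foldl (fun acc m => acc ++ pvGetInd m) []
    if all_indicators = [] then none
    else
      let proficiency_hierarchy := ["expert", "advanced", "intermediate", "beginner"]
      -- for level in hierarchy: if level in all_indicators: return level  (falls through to None)
      proficiency_hierarchy.find? (fun level => all_indicators.contains level)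

-- ===== PORT B =====
-- mention.get('proficiency_indicators', []) (B-side copy)
def pvGetIndB (m : List (String × List String)) : List String :=
  PySem.Dict.getD (PySem.Dict.mk m) "proficiency_indicators" []

-- rank = {lvl: i for i, lvl in enumerate(levels)}; rank.get(ind)
def pvRankGet (ind : String) : Option Int :=
  PySem.Dict.get? (PySem.Dict.mk [("expert", (0:Int)), ("advanced", 1), ("intermediate", 2), ("beginner", 3)]) ind

-- body of B's inner loop: if r is not None and (best is None or r < best): best = r
def pvStep (best : Option Int) (ind : String) : Option Int :=
  match pvRankGet ind with
  | none => best
  | some r =>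
    match best with
    | none => some r
    | some b => if r < b then some r else best

def determine_proficiency_level_py_alt (mentions : List (List (String × List String))) : Option String :=
  if mentions = [] then none
  else
    let levels := ["expert", "advanced", "intermediate", "beginner"]
    let best := mentions.foldl (fun b m => (pvGetIndB m).foldl pvStep b) none
    match best with
    | none => none
    | some b => PySem.List.pyGet? levels b   -- levels[best]; best is always 0..3 here

-- ===== PRECONDITION & SPEC =====
def Spec_determine_proficiency_level_py (mentions : List (List (String × List String))) (out : Option String) : Prop := out = determine_proficiency_level_py_alt mentions
instance (mentions : List (List (String × List String))) (out : Option String) : Decidable (Spec_determine_proficiency_level_py mentions out) := by unfold Spec_determine_proficiency_level_py; infer_instance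

-- ===== CLAIM (what is proved, stated in full; the proofs are below) =====
def Claim_equal_determine_proficiency_level_py : Prop := ∀ (mentions : List (List (String × List String))), Dom_determine_proficiency_level_py mentions → Spec_determine_proficiency_level_py mentions (determine_proficiency_level_py mentions)

-- ===== LEMMAS AND PROOFS =====

-- merge of two fold states (option-min with left bias on ties)
def pvMerge : Option Int → Option Int → Option Int
  | none, y => y
  | some b, none => some b
  | some b, some r => if r < b then some r else some b

theorem pvStep_eq_merge (s : Option Int) (x : String) : pvStep s x = pvMerge s (pvRankGet x) := by
  unfold pvStep pvMerge
  cases pvRankGet x <;> cases s <;> simp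

theorem pvMerge_assoc (a b c : Option Int) : pvMerge (pvMerge a b) c = pvMerge a (pvMerge b c) := by
  cases a <;> cases b <;> cases c <;> simp only [pvMerge]
  all_goals (split_ifs <;> simp_all)
  all_goals (first | omega | (split_ifs <;> simp_all <;> omega))

theorem foldl_pvStep_merge (l : List String) (s : Option Int) :
    l.foldl pvStep s = pvMerge s (l.foldl pvStep none) := by
  induction l generalizing s with
  | nil => cases s <;> simp [pvMerge]
  | cons x xs ih =>
    simp only [List.foldl_cons]
    rw [ih (pvStep s x), ih (pvStep none x), pvStep_eq_merge, pvStep_eq_merge]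
    exact pvMerge_assoc _ _ _

theorem pvGetIndB_eq (m : List (String × List String)) : pvGetIndB m = pvGetInd m := rfl

theorem foldl_nested_eq_flat (mentions : List (List (String × List String))) (s : Option Int) :
    mentions.foldl (fun b m => (pvGetIndB m).foldl pvStep b) s
      = (mentions.flatMap pvGetInd).foldl pvStep s := by
  simp only [pvGetIndB_eq]
  induction mentions generalizing s with
  | nil => rfl
  | cons m ms ih => simp only [List.foldl_cons, List.flatMap_cons, List.foldl_append, ih]

-- characterization of the min-rank fold by the four membership tests
theorem foldl_pvStep_char (l : List String) :
    l.foldl pvStep none =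
      if l.contains "expert" then some 0
      else if l.contains "advanced" then some 1
      else if l.contains "intermediate" then some 2
      else if l.contains "beginner" then some 3
      else none := by
  induction l with
  | nil => simp
  | cons x xs ih =>
    simp only [List.foldl_cons]
    rw [foldl_pvStep_merge, ih, pvStep_eq_merge]
    by_cases he : x = "expert"
    · subst he
      simp only [show pvRankGet "expert" = some 0 from rfl]
      split_ifs <;> simp_all [pvMerge]
    · by_cases ha : x = "advanced"
      · subst ha
        simp only [show pvRankGet "advanced" = some 1 from rfl]
        split_ifs <;> simp_all [pvMerge]
      · by_cases hi : x = "intermediate"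
        · subst hi
          simp only [show pvRankGet "intermediate" = some 2 from rfl]
          split_ifs <;> simp_all [pvMerge]
        · by_cases hb : x = "beginner"
          · subst hb
            simp only [show pvRankGet "beginner" = some 3 from rfl]
            split_ifs <;> simp_all [pvMerge]
          · have hr : pvRankGet x = none := by
              simp [pvRankGet, PySem.Dict.get?, Ne.symm he, Ne.symm ha, Ne.symm hi, Ne.symm hb]
            rw [hr]
            simp [pvMerge, Ne.symm he, Ne.symm ha, Ne.symm hi, Ne.symm hb]

-- find? over the literal hierarchy as nested ifs on the membership tests
theorem pvFindHier (L : List String) :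
    (["expert", "advanced", "intermediate", "beginner"].find? (fun level => L.contains level)) =
      (if L.contains "expert" then some "expert"
       else if L.contains "advanced" then some "advanced"
       else if L.contains "intermediate" then some "intermediate"
       else if L.contains "beginner" then some "beginner"
       else none) := by
  cases h1 : L.contains "expert" <;> cases h2 : L.contains "advanced" <;>
  cases h3 : L.contains "intermediate" <;> cases h4 : L.contains "beginner" <;>
    simp_all [List.find?]

-- ===== VERDICT (by name: the statement is the Claim_ definition above) =====
theorem determine_proficiency_level_py_spec : Claim_equal_determine_proficiency_level_py := by
  intro mentions _
  unfold Spec_determine_proficiency_level_py determine_proficiency_level_py determine_proficiency_level_py_alt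
  by_cases hm : mentions = []
  · simp [hm]
  · simp only [hm, if_false]
    rw [PySem.List.foldl_append_eq_flatMap, List.nil_append, foldl_nested_eq_flat, foldl_pvStep_char]
    by_cases hall : mentions.flatMap pvGetInd = []
    · simp [hall]
    · simp only [hall, if_false]
      rw [pvFindHier]
      cases h1 : (mentions.flatMap pvGetInd).contains "expert" <;>
      cases h2 : (mentions.flatMap pvGetInd).contains "advanced" <;>
      cases h3 : (mentions.flatMap pvGetInd).contains "intermediate" <;>
      cases h4 : (mentions.flatMap pvGetInd).contains "beginner" <;>
        simp only [h1, h2, h3, h4, if_true, if_false, Bool.false_eq_true] <;>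
        simp [PySem.List.pyGet?, PySem.List.pyIdx?]
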